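-- pv_equiv track=rewrite | github.com/Embedding-Space/Alpha-Brain | src/alpha_brain/tools/search.py | extract_first_paragraph
-- ===== SOURCE A (Python) =====
-- def extract_first_paragraph(content: str) -> str:
--     """Extract the first paragraph from markdown content.
--
--     Skips headers and returns the first actual paragraph of text.
--     """
--     lines = content.strip().split('\n')
--
--     # Find the first non-header, non-empty line
--     for i, line in enumerate(lines):
--         stripped = line.strip()
--         if stripped and not stripped.startswith('#'):
--             # Found start of first paragraph
--             paragraph_lines = [stripped]
--
--             # Continue collecting lines until we hit a blank line or end
--             for j in range(i + 1, len(lines)):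
--                 next_line = lines[j].strip()
--                 if not next_line:  # Blank line = end of paragraph
--                     break
--                 if next_line.startswith('#'):  # Header = end of paragraph
--                     break
--                 if next_line.startswith(('-', '*')):  # Bullet list = end of paragraph
--                     break
--                 if next_line.startswith(('1.', '2.')):  # Numbered list = end
--                     break
--                 paragraph_lines.append(next_line)
--
--             return ' '.join(paragraph_lines)
--
--     # Fallback if no paragraph found
--     return content[:300] + "..." if len(content) > 300 else content
-- ===== SOURCE B (Python) =====
-- def extract_first_paragraph(content: str) -> str:
--     """Extract the first paragraph from markdown content.
--
--     Single full pass over the lines running a three-state automaton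
--     (BEFORE -> IN -> DONE) with an accumulator; no nested loop, no break.
--     """
--     BEFORE, IN, DONE = 0, 1, 2
--     state = BEFORE
--     acc = []
--     for raw in content.strip().split('\n'):
--         s = raw.strip()
--         if state == BEFORE:
--             if s and not s.startswith('#'):
--                 acc.append(s)
--                 state = IN
--         elif state == IN:
--             if not s or s.startswith(('#', '-', '*', '1.', '2.')):
--                 state = DONE
--             else:
--                 acc.append(s)
--     if state != BEFORE:
--         return ' '.join(acc)
--     return content[:300] + "..." if len(content) > 300 else content
-- ===== Notes on version B (the rewrite author's own statement) =====
-- stated objective: alternative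
-- what changed: Replaced A's nested search-then-collect loops with breaks and early return by a single full pass over every line running a three-state automaton (BEFORE/IN/DONE) with an accumulator; there is no inner loop and no early exit, the state monotonically advances.
import Mathlib
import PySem

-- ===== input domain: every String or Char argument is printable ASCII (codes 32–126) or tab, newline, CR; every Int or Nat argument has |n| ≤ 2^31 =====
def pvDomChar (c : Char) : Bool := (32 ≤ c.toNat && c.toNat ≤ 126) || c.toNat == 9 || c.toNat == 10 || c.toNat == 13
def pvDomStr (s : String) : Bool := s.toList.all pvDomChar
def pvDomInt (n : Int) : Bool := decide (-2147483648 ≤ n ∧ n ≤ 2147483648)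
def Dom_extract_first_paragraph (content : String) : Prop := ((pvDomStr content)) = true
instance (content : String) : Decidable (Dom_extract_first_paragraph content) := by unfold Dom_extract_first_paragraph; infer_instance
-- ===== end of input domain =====

-- B replaces A's nested search-then-collect loops (with breaks and early return) by a single
-- full pass over every line running a three-state automaton with an accumulator
-- (objective: alternative, same cost).

-- ===== PORT A =====
-- inner 'for j in range(i+1, len(lines))' loop of A, iterating the tail after the found line
def pvA_collect : List String → List String
  | [] => []
  | l :: rest =>
    let n := PySem.Str.strip l
    if n = "" then []
    else if PySem.Str.startswith n "#" = true then []
    else if (PySem.Str.startswith n "-" || PySem.Str.startswith n "*") = true then []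
    else if (PySem.Str.startswith n "1." || PySem.Str.startswith n "2.") = true then []
    else n :: pvA_collect rest

-- outer 'for i, line in enumerate(lines)' loop of A
def pvA_find : List String → Option String
  | [] => none
  | line :: rest =>
    let s := PySem.Str.strip line
    if s ≠ "" ∧ PySem.Str.startswith s "#" = false then
      some (PySem.Str.join " " (s :: pvA_collect rest))
    else pvA_find rest

def extract_first_paragraph (content : String) : String :=
  -- content.strip().split('\n'); '\n' ≠ "" so split? never returns none
  let lines := (PySem.Str.split? (PySem.Str.strip content) "\n").getD []
  match pvA_find lines with
  | some p => p
  | none => if PySem.Str.len content > 300 then PySem.Str.slice content none (some 300) ++ "..." else content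

-- ===== PORT B =====
-- the loop body of B: one automaton step on state (0 = BEFORE, 1 = IN, 2 = DONE) × accumulator
def pvB_step (st : Nat × List String) (raw : String) : Nat × List String :=
  let s := PySem.Str.strip raw
  match st with
  | (0, acc) => if s != "" && !PySem.Str.startswith s "#" then (1, acc ++ [s]) else (0, acc)
  | (1, acc) =>
      if s == "" || PySem.Str.startswith s "#" || PySem.Str.startswith s "-" ||
          PySem.Str.startswith s "*" || PySem.Str.startswith s "1." ||
          PySem.Str.startswith s "2." then (2, acc)
      else (1, acc ++ [s])
  | (st, acc) => (st, acc)

def extract_first_paragraph_alt (content : String) : String :=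
  let lines := (PySem.Str.split? (PySem.Str.strip content) "\n").getD []
  let r := lines.foldl pvB_step (0, [])
  if r.1 ≠ 0 then PySem.Str.join " " r.2
  else if PySem.Str.len content > 300 then PySem.Str.slice content none (some 300) ++ "..." else content

-- ===== PRECONDITION & SPEC =====
def Spec_extract_first_paragraph (content : String) (out : String) : Prop := out = extract_first_paragraph_alt content
instance (content : String) (out : String) : Decidable (Spec_extract_first_paragraph content out) := by unfold Spec_extract_first_paragraph; infer_instance

-- ===== CLAIM (what is proved, stated in full; the proofs are below) =====
def Claim_equal_extract_first_paragraph : Prop := ∀ (content : String), Dom_extract_first_paragraph content → Spec_extract_first_paragraph content (extract_first_paragraph content)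

-- ===== LEMMAS AND PROOFS =====

-- the two line predicates both programs test (proof-side vocabulary only)
def pvBad (s : String) : Bool := s == "" || PySem.Str.startswith s "#"
def pvStop (s : String) : Bool := s == "" || PySem.Str.startswith s "#" || PySem.Str.startswith s "-" ||
  PySem.Str.startswith s "*" || PySem.Str.startswith s "1." || PySem.Str.startswith s "2."

theorem pvA_collect_eq (ls : List String) :
    pvA_collect ls = (ls.map PySem.Str.strip).takeWhile (fun s => !pvStop s) := by
  induction ls with
  | nil => rfl
  | cons l rest ih =>
    simp only [pvA_collect, List.map_cons, List.takeWhile_cons]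
    set n := PySem.Str.strip l with hn
    by_cases h1 : n = "" <;>
    rcases h2 : PySem.Str.startswith n "#" <;>
    rcases h3 : PySem.Str.startswith n "-" <;>
    rcases h4 : PySem.Str.startswith n "*" <;>
    rcases h5 : PySem.Str.startswith n "1." <;>
    rcases h6 : PySem.Str.startswith n "2." <;>
    simp_all [pvStop]

theorem pvA_find_eq (ls : List String) :
    pvA_find ls = (match (ls.map PySem.Str.strip).dropWhile pvBad with
      | [] => none
      | x :: xs => some (PySem.Str.join " " (x :: xs.takeWhile (fun s => !pvStop s)))) := by
  induction ls with
  | nil => rfl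
  | cons l rest ih =>
    simp only [pvA_find, List.map_cons, List.dropWhile_cons]
    set s := PySem.Str.strip l with hs
    by_cases h1 : s = "" <;> rcases h2 : PySem.Str.startswith s "#" <;>
      simp_all [pvBad, pvA_collect_eq]

-- once DONE, the fold is the identity
theorem pvB_done (ls : List String) (acc : List String) :
    ls.foldl pvB_step (2, acc) = (2, acc) := by
  induction ls with
  | nil => rfl
  | cons l rest ih => simpa [pvB_step] using ih

theorem pvB_in (ls : List String) (acc : List String) :
    (ls.foldl pvB_step (1, acc)).1 ≠ 0 ∧
      (ls.foldl pvB_step (1, acc)).2 = acc ++ (ls.map PySem.Str.strip).takeWhile (fun s => !pvStop s) := by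
  induction ls generalizing acc with
  | nil => simp
  | cons l rest ih =>
    simp only [List.foldl_cons, List.map_cons, List.takeWhile_cons]
    have hstep : pvB_step (1, acc) l =
        if pvStop (PySem.Str.strip l) then (2, acc) else (1, acc ++ [PySem.Str.strip l]) := rfl
    rw [hstep]
    by_cases hstop : pvStop (PySem.Str.strip l) = true
    · rw [if_pos hstop, pvB_done]
      simp [hstop]
    · rw [Bool.not_eq_true] at hstop
      rw [if_neg (by simp [hstop])]
      have hrec := ih (acc ++ [PySem.Str.strip l])
      simp only [hstop, Bool.not_false, if_true, hrec.2]
      exact ⟨hrec.1, by simp⟩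

theorem pvB_fold_spec (ls : List String) :
    ((ls.map PySem.Str.strip).dropWhile pvBad = [] → ls.foldl pvB_step (0, []) = (0, [])) ∧
    (∀ x xs, (ls.map PySem.Str.strip).dropWhile pvBad = x :: xs →
      (ls.foldl pvB_step (0, [])).1 ≠ 0 ∧
      (ls.foldl pvB_step (0, [])).2 = x :: xs.takeWhile (fun s => !pvStop s)) := by
  induction ls with
  | nil => simp
  | cons l rest ih =>
    simp only [List.map_cons, List.dropWhile_cons, List.foldl_cons]
    have hstep : pvB_step (0, []) l =
        if !pvBad (PySem.Str.strip l) then (1, ([] : List String) ++ [PySem.Str.strip l])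
        else (0, []) := by
      simp only [pvB_step, pvBad, Bool.not_or, bne]
      rfl
    rw [hstep]
    by_cases hbad : pvBad (PySem.Str.strip l) = true
    · simp only [hbad, Bool.not_true, if_true]
      exact ih
    · rw [Bool.not_eq_true] at hbad
      simp only [hbad, Bool.not_false, if_true]
      constructor
      · intro h; exact absurd h (by simp)
      · intro x xs hx
        obtain ⟨hx1, hx2⟩ := List.cons.inj hx
        obtain ⟨h1, h2⟩ := pvB_in rest ([] ++ [PySem.Str.strip l])
        refine ⟨h1, ?_⟩
        rw [h2, hx1, ← hx2]
        rfl

-- ===== VERDICT (by name: the statement is the Claim_ definition above) =====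
theorem extract_first_paragraph_spec : Claim_equal_extract_first_paragraph := by
  intro content _
  unfold Spec_extract_first_paragraph extract_first_paragraph extract_first_paragraph_alt
  dsimp only
  set ls := (PySem.Str.split? (PySem.Str.strip content) "\n").getD [] with hls
  rw [pvA_find_eq]
  obtain ⟨hnil, hcons⟩ := pvB_fold_spec ls
  cases hdw : (ls.map PySem.Str.strip).dropWhile pvBad with
  | nil => simp [hnil hdw]
  | cons x xs =>
    obtain ⟨h1, h2⟩ := hcons x xs hdw
    simp [h1, h2]
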